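-- pv_equiv track=rewrite | github.com/unlearning/python-algorithm | ppinppini/Day1/Day2/숫자 찾기.py | solution
-- ===== SOURCE A (Python) =====
-- def solution(num, k):
--     answer = 0
--     str_num = str(num)
-- # 나의풀이
--     for i in range(0, len(str_num)) :
--
--         if str_num[i] == str(k) :
--             answer = i + 1
--             break
--
--     if answer == 0 :
--         answer = -1
--
--     return answer
-- ===== SOURCE B (Python) =====
-- def solution(num, k):
--     pos = {}
--     for i, ch in reversed(list(enumerate(str(num)))):
--         pos[ch] = i + 1
--     return pos.get(str(k), -1)
-- ===== Notes on version B (the rewrite author's own statement) =====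
-- stated objective: alternative
-- what changed: Replaces A's early-breaking linear search over range(len(str(num))) with a single reverse pass that builds a digit->first-1-based-position table (later overwrites keep the earliest position) followed by one dict lookup with default -1.
import Mathlib
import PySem

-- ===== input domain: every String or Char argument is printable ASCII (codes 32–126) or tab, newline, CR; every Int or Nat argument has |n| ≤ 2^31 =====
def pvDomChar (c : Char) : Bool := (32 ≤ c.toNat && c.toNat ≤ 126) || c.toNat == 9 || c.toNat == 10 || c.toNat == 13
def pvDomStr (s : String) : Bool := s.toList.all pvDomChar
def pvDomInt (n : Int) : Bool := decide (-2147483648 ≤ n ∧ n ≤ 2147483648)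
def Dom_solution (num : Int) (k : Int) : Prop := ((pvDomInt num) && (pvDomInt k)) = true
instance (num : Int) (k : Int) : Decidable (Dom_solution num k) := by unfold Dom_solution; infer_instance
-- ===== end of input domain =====

-- B replaces A's early-breaking forward search with a reverse-pass first-position table plus one lookup (alternative decomposition, same cost).

-- ===== PORT A =====
-- the for-loop over range(0, len(str_num)) with break: recursion over the chars with the running index i
def solutionLoop : List Char → String → Int → Int
  | [], _, _ => 0
  | c :: rest, t, i => if String.ofList [c] = t then i + 1 else solutionLoop rest t (i + 1)

def solution (num : Int) (k : Int) : Int :=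
  let strNum := (PySem.Int.toStr num).toList
  let answer := solutionLoop strNum (PySem.Int.toStr k) 0
  if answer = 0 then -1 else answer

-- ===== PORT B =====
def solution_alt (num : Int) (k : Int) : Int :=
  let s := (PySem.Int.toStr num).toList
  let pos := (PySem.List.enumerate s 0).reverse.foldl
      (fun d ic => d.insert (String.ofList [ic.2]) (ic.1 + 1)) PySem.Dict.empty
  pos.getD (PySem.Int.toStr k) (-1)

-- ===== PRECONDITION & SPEC =====
def Spec_solution (num : Int) (k : Int) (out : Int) : Prop := out = solution_alt num k
instance (num : Int) (k : Int) (out : Int) : Decidable (Spec_solution num k out) := by unfold Spec_solution; infer_instance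

-- ===== CLAIM (what is proved, stated in full; the proofs are below) =====
def Claim_equal_solution : Prop := ∀ (num : Int) (k : Int), Dom_solution num k → Spec_solution num k (solution num k)

-- ===== LEMMAS AND PROOFS =====
-- the reverse-insert fold's lookup equals A's forward search (earlier positions overwrite later ones)
lemma dict_lookup_eq_search (s : List Char) (t : String) (off : Int) (hoff : 0 ≤ off)
    (d : PySem.Dict String Int) :
    ((PySem.List.enumerate s off).reverse.foldl
        (fun d ic => d.insert (String.ofList [ic.2]) (ic.1 + 1)) d).getD t (-1)
      = if solutionLoop s t off = 0 then d.getD t (-1) else solutionLoop s t off := by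
  induction s generalizing off d with
  | nil => simp [PySem.List.enumerate, solutionLoop]
  | cons c rest ih =>
    rw [PySem.List.enumerate_cons, List.reverse_cons, List.foldl_append]
    simp only [List.foldl_cons, List.foldl_nil]
    rw [PySem.Dict.getD_insert]
    by_cases hc : String.ofList [c] = t
    · simp only [hc, solutionLoop, if_pos]
      rw [if_neg (by omega : ¬ (off + 1 = 0))]
    · rw [if_neg (by exact fun h => hc h.symm)]
      simp only [solutionLoop, if_neg hc]
      exact ih (off + 1) (by omega) d

-- ===== VERDICT (by name: the statement is the Claim_ definition above) =====
theorem solution_spec : Claim_equal_solution := by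
  intro num k _
  unfold Spec_solution solution solution_alt
  rw [dict_lookup_eq_search _ _ 0 le_rfl]
  simp [PySem.Dict.getD_empty]
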